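-- pv_equiv track=rewrite | github.com/xioxet/THE-SHRINE | inf1002/inf1002_lab/Chro_lab_3/CountLetters.py | double_count
-- ===== SOURCE A (Python) =====
-- def double_count(str1, str2):
--       wordDict = {}
--       for i in str1 + str2:
--             if not i in wordDict:
--                   wordDict.update({i:1})
--             else:
--                   wordDict[i] = wordDict.get(i) + 1
--       return wordDict
-- ===== SOURCE B (Python) =====
-- def double_count(str1, str2):
--     lst = list(str1 + str2)
--     return {c: lst.count(c) for c in dict.fromkeys(lst)}
-- ===== Notes on version B (the rewrite author's own statement) =====
-- stated objective: idiomatic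
-- what changed: Replaced the running-counter dict loop by a comprehension that dedups the concatenation once (dict.fromkeys) and counts each distinct character with list.count.
import Mathlib
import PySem

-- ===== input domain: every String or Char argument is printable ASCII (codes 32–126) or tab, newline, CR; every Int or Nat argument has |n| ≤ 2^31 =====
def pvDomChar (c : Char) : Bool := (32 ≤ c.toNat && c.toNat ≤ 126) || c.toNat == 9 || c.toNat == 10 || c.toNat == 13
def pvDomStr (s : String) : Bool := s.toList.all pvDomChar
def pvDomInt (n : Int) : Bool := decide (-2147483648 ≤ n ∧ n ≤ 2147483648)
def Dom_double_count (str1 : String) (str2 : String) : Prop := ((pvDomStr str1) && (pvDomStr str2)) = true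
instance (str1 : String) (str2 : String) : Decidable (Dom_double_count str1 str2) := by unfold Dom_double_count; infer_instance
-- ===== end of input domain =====

-- B replaces A's running-counter dict loop with dedup-then-count-per-distinct-character (idiomatic comprehension); same result.

-- ===== PORT A =====
-- A: build a dict by a single pass, inserting 1 on first sight, otherwise get+1.
-- Keys are single-character strings (Python iterates a str by 1-char strings).
-- wordDict.get(i) is taken in the branch where i is a key, so (get? …).getD 0 is exact there.
def double_count (str1 : String) (str2 : String) : List (String × Int) :=
  ((str1 ++ str2).toList.foldl
    (fun d c =>
      let i : String := String.ofList [c]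
      if !(d.contains i) then d.insert i 1
      else d.insert i ((d.get? i).getD 0 + 1))
    PySem.Dict.empty).items

-- ===== PORT B =====
-- B: list the concatenation, dedup it (dict.fromkeys = first occurrences), count each distinct char.
def double_count_alt (str1 : String) (str2 : String) : List (String × Int) :=
  let lst := (str1 ++ str2).toList
  (PySem.List.dedup lst).map (fun c => (String.ofList [c], (lst.count c : Int)))

-- ===== PRECONDITION & SPEC =====
def Spec_double_count (str1 : String) (str2 : String) (out : List (String × Int)) : Prop := out = double_count_alt str1 str2
instance (str1 : String) (str2 : String) (out : List (String × Int)) : Decidable (Spec_double_count str1 str2 out) := by unfold Spec_double_count; infer_instance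

-- ===== CLAIM (what is proved, stated in full; the proofs are below) =====
def Claim_equal_double_count : Prop := ∀ (str1 : String) (str2 : String), Dom_double_count str1 str2 → Spec_double_count str1 str2 (double_count str1 str2)

-- ===== LEMMAS AND PROOFS =====

theorem key_injective : Function.Injective (fun c : Char => String.ofList [c]) := by
  intro a b h
  have := congrArg String.toList h
  simpa using this

theorem foldl_add_map {α β : Type} [BEq α] [LawfulBEq α] [BEq β] [LawfulBEq β]
    (f : α → β) (hf : Function.Injective f) (l : List α) (s : List α) :
    (l.map f).foldl PySem.Set.add (s.map f) = (l.foldl PySem.Set.add s).map f := by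
  induction l generalizing s with
  | nil => rfl
  | cons c t ih =>
    simp only [List.map_cons, List.foldl_cons]
    have hadd : PySem.Set.add (s.map f) (f c) = (PySem.Set.add s c).map f := by
      rw [PySem.Set.add_eq_ite, PySem.Set.add_eq_ite]
      by_cases hc : c ∈ s
      · simp [hc, hf.eq_iff]
      · simp [hc, hf.eq_iff]
    rw [hadd, ih]

theorem ofList_map_inj {α β : Type} [BEq α] [LawfulBEq α] [BEq β] [LawfulBEq β]
    (f : α → β) (hf : Function.Injective f) (l : List α) :
    PySem.Set.ofList (l.map f) = (PySem.Set.ofList l).map f := by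
  rw [PySem.Set.ofList_eq_foldl, PySem.Set.ofList_eq_foldl]
  simpa using foldl_add_map f hf l []

-- A's loop body is extensionally the standard counter step on the mapped key
theorem body_eq (d : PySem.Dict String Int) (c : Char) :
    (let i : String := String.ofList [c]
     if !(d.contains i) then d.insert i 1
     else d.insert i ((d.get? i).getD 0 + 1))
    = d.insert (String.ofList [c]) (d.getD (String.ofList [c]) 0 + 1) := by
  by_cases h : d.contains (String.ofList [c]) = true
  · simp [h, PySem.Dict.getD_eq_get?_getD]
  · have h' : d.contains (String.ofList [c]) = false := by simpa using h
    rw [PySem.Dict.getD_of_not_contains (h := h')]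
    simp [h']

theorem double_count_eq_counter (str1 str2 : String) :
    double_count str1 str2 =
      (PySem.Dict.counter ((str1 ++ str2).toList.map (fun c => String.ofList [c]))).items := by
  unfold double_count
  rw [← PySem.Dict.foldl_insert_getD_add_one_eq_counter, List.foldl_map]
  have h : (fun (d : PySem.Dict String Int) (c : Char) =>
      let i : String := String.ofList [c]
      if !(d.contains i) then d.insert i 1
      else d.insert i ((d.get? i).getD 0 + 1))
      = fun (d : PySem.Dict String Int) (c : Char) =>
          d.insert (String.ofList [c]) (d.getD (String.ofList [c]) 0 + 1) :=
    funext fun d => funext fun c => body_eq d c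
  rw [h]

-- ===== VERDICT (by name: the statement is the Claim_ definition above) =====
theorem double_count_spec : Claim_equal_double_count := by
  intro str1 str2 _
  unfold Spec_double_count double_count_alt
  rw [double_count_eq_counter, PySem.Dict.items_counter,
      ofList_map_inj _ key_injective, List.map_map]
  simp only [PySem.List.dedup_eq_ofList]
  refine List.map_congr_left (fun c _ => ?_)
  simp [List.count_map_of_injective _ _ key_injective]
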